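-- pv_equiv track=rewrite | github.com/RDNordic/ai-championship-warroom | src/grocerybot/planner.py | _pick_multiset_combinations
-- ===== SOURCE A (Python) =====
-- from itertools import combinations
--
-- def _pick_multiset_combinations(
--     items: list[str],
--     k: int,
-- ) -> set[tuple[str, ...]]:
--     if k <= 0:
--         return {()}
--     if k > len(items):
--         return set()
--     result: set[tuple[str, ...]] = set()
--     for idxs in combinations(range(len(items)), k):
--         result.add(tuple(sorted(items[i] for i in idxs)))
--     return result
-- ===== SOURCE B (Python) =====
-- def _pick_multiset_combinations(
--     items: list[str],
--     k: int,
-- ) -> set[tuple[str, ...]]: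
--     if k <= 0:
--         return {()}
--
--     def rec(i: int, need: int) -> list[tuple[str, ...]]:
--         if need == 0:
--             return [()]
--         if len(items) - i < need:
--             return []
--         return [(items[i],) + rest for rest in rec(i + 1, need - 1)] + rec(i + 1, need)
--
--     return {tuple(sorted(c)) for c in rec(0, k)}
-- ===== Notes on version B (the rewrite author's own statement) =====
-- stated objective: alternative
-- what changed: replaces the itertools.combinations-over-indices loop feeding a set with a direct choose/skip recursion on the list that prunes branches with fewer remaining items than needed
import Mathlib
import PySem

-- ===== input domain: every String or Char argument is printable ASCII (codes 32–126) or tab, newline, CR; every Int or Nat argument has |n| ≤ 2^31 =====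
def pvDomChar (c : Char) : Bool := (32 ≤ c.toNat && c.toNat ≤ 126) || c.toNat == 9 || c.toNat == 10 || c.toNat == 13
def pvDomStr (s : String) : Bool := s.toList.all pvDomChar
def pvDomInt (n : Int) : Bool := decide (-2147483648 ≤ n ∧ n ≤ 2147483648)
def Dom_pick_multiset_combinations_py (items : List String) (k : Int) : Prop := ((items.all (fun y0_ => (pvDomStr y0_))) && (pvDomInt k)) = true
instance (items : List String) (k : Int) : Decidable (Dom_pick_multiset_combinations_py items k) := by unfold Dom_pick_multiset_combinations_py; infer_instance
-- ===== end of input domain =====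

-- B replaces the itertools.combinations-over-indices loop by a direct choose/skip recursion on the
-- list with a remaining-length pruning cut (objective: alternative decomposition, same asymptotics).

-- ===== PORT A =====
-- literal port of A: for idxs in combinations(range(len(items)), k): result.add(tuple(sorted(items[i] for i in idxs)))
-- items[i] is ported as pyGetD items i "": every i drawn from range(len(items)) is in range, so the default is unreachable
def pick_multiset_combinations_py (items : List String) (k : Int) : List (List String) :=
  if k ≤ 0 then [[]]
  else if k > (items.length : Int) then []
  else
    (PySem.List.combinations (PySem.List.pyRange 0 (items.length : Int) 1) k.toNat).foldl
      (fun result idxs =>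
        PySem.Set.add result
          (PySem.List.sorted (idxs.map (fun i => PySem.List.pyGetD items i "")) (fun x => x) false))
      PySem.Set.empty

-- ===== PORT B =====
-- rec(i, need) of Source B: choose-or-skip items[i], pruning when fewer than `need` items remain
def pvAltRec (items : List String) (i : Nat) (need : Nat) : List (List String) :=
  if _h0 : need = 0 then [[]]
  else if _h1 : items.length - i < need then []
  else
    ((pvAltRec items (i + 1) (need - 1)).map
        (fun rest => (PySem.List.pyGetD items (i : Int) "") :: rest))
      ++ pvAltRec items (i + 1) need
termination_by items.length - i
decreasing_by all_goals omega

def pick_multiset_combinations_py_alt (items : List String) (k : Int) : List (List String) :=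
  if k ≤ 0 then [[]]
  else
    (pvAltRec items 0 k.toNat).foldl
      (fun s c => PySem.Set.add s (PySem.List.sorted c (fun x => x) false))
      PySem.Set.empty

-- ===== PRECONDITION & SPEC =====
def Spec_pick_multiset_combinations_py (items : List String) (k : Int) (out : List (List String)) : Prop := out = pick_multiset_combinations_py_alt items k
instance (items : List String) (k : Int) (out : List (List String)) : Decidable (Spec_pick_multiset_combinations_py items k out) := by unfold Spec_pick_multiset_combinations_py; infer_instance

-- ===== CLAIM (what is proved, stated in full; the proofs are below) =====
def Claim_equal_pick_multiset_combinations_py : Prop := ∀ (items : List String) (k : Int), Dom_pick_multiset_combinations_py items k → Spec_pick_multiset_combinations_py items k (pick_multiset_combinations_py items k)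

-- ===== LEMMAS AND PROOFS =====

-- B's recursion generates exactly itertools.combinations of the i-th suffix, in the same order
theorem pvAltRec_eq_combinations (items : List String) (i need : Nat) :
    pvAltRec items i need = PySem.List.combinations (items.drop i) need := by
  refine pvAltRec.induct items
    (fun i need => pvAltRec items i need = PySem.List.combinations (items.drop i) need)
    ?_ ?_ ?_ i need
  · intro i
    rw [pvAltRec.eq_def]
    simp [PySem.List.combinations_zero]
  · intro i need h0 h1
    rw [pvAltRec.eq_def, dif_neg h0, dif_pos h1]
    have hlen : (items.drop i).length < need := by simp; omega
    exact (PySem.List.combinations_eq_nil_of_length_lt _ hlen).symm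
  · intro i need h0 h1 ih1 ih2
    rw [pvAltRec.eq_def, dif_neg h0, dif_neg h1]
    have hi : i < items.length := by omega
    obtain ⟨m, hm⟩ : ∃ m, need = m + 1 := ⟨need - 1, by omega⟩
    subst hm
    rw [List.drop_eq_getElem_cons hi, PySem.List.combinations_cons_succ]
    have hget : PySem.List.pyGetD items (i : Int) "" = items[i] := by
      rw [PySem.List.pyGetD_natCast]; simp [hi]
    simp only [Nat.add_sub_cancel] at ih1
    simp only [Nat.add_sub_cancel, ih2, hget, ih1]

theorem pick_multiset_combinations_py_spec : Claim_equal_pick_multiset_combinations_py := by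
  intro items k _
  unfold Spec_pick_multiset_combinations_py pick_multiset_combinations_py pick_multiset_combinations_py_alt
  by_cases hk : k ≤ 0
  · simp [hk]
  · rw [if_neg hk, if_neg hk]
    rw [pvAltRec_eq_combinations, List.drop_zero]
    by_cases hbig : k > (items.length : Int)
    · rw [if_pos hbig]
      rw [PySem.List.combinations_eq_nil_of_length_lt _ (by omega)]
      rfl
    · rw [if_neg hbig]
      conv_rhs => rw [← PySem.List.map_pyGetD_pyRange_zero' items "",
                      PySem.List.combinations_map, List.foldl_map]
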